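-- pv_equiv track=rewrite | github.com/zioni715/Zioni_Daily_Baekjoon | 7. 2차원 배열/10798.py | read_vertically
-- ===== SOURCE A (Python) =====
-- def read_vertically(words):
--   result = []
--   max_length = max(len(word) for word in words) # 5개 단어 중 가장 긴 단어의 길이
--   for i in range(max_length): # 세로로 읽기 시작하는 부분
--     for word in words:
--       if i < len(word):
--         result.append(word[i])
--   return ''.join(result) # 리스트에 모인 글자들을 공백 없이 이어붙여 하나의 문자열로 반환
-- ===== SOURCE B (Python) =====
-- def read_vertically(words):
--     # Single row-major pass: distribute each word's characters into per-column
--     # buckets, then concatenate the buckets in column order.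
--     buckets = []
--     for word in words:
--         for i, ch in enumerate(word):
--             if i == len(buckets):
--                 buckets.append([])
--             buckets[i].append(ch)
--     return ''.join(''.join(b) for b in buckets)
-- ===== Notes on version B (the rewrite author's own statement) =====
-- stated objective: alternative
-- what changed: A scans column-major with a bounds check per (column, word) pair after computing the max length; B makes one row-major pass distributing each word's characters into per-column buckets and joins the buckets, never computing the max length or re-scanning short words.
-- outside the precondition, e.g. on read_vertically([]): A raises ValueError, B returns ''
import Mathlib
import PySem

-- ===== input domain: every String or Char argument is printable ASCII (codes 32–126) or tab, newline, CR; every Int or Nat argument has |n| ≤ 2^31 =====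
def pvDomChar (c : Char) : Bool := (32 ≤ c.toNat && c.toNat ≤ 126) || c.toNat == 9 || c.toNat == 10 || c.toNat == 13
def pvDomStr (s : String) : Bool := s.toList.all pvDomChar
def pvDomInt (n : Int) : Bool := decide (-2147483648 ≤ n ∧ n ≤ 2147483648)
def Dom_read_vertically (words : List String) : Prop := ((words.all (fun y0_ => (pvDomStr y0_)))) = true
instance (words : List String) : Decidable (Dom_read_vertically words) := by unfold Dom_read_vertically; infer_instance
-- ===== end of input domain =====

-- B reads the grid in one row-major pass into per-column buckets instead of A's
-- column-major double loop with a bounds check; return values agree on every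
-- non-empty words list (on [] A raises ValueError, B returns "").

-- ===== PORT A =====
def read_vertically (words : List String) : String :=
  -- max_length = max(len(word) for word in words); none = ValueError (empty words), excluded by Pre_
  match PySem.List.max? (words.map (fun w => PySem.Str.len w)) (fun x => x) with
  | none => ""
  | some maxLength =>
    let result : List Char :=
      (PySem.List.pyRange 0 maxLength 1).foldl (fun res i =>
        words.foldl (fun res w =>
          if i < PySem.Str.len w then
            res ++ [(PySem.Str.pyGet? w i).getD ' ']   -- word[i]; defined since 0 ≤ i < len(word)
          else res) res) []
    String.ofList result   -- ''.join(result)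

-- ===== PORT B =====
-- one inner step of Source B: `if i == len(buckets): buckets.append([])` then `buckets[i].append(ch)`
def pvBStep (bs : List (List Char)) (p : Int × Char) : List (List Char) :=
  let bs' := if p.1 == (bs.length : Int) then bs ++ [[]] else bs
  bs'.modify p.1.toNat (fun b => b ++ [p.2])   -- i ≥ 0 (it comes from enumerate), so toNat is exact

def read_vertically_alt (words : List String) : String :=
  let buckets : List (List Char) :=
    words.foldl (fun bs w => (PySem.List.enumerate w.toList).foldl pvBStep bs) []
  String.ofList buckets.flatten   -- ''.join(''.join(b) for b in buckets)

-- ===== PRECONDITION & SPEC =====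
-- Pre_ excludes exactly the inputs where A raises: on words = [] Python's max() over an empty
-- generator raises ValueError (B would return "" there).
def Pre_read_vertically (words : List String) : Prop := words ≠ []
instance (words : List String) : Decidable (Pre_read_vertically words) := by unfold Pre_read_vertically; infer_instance
def pvWitness_read_vertically : List String := (["abc", "de", "fghi"])

def Spec_read_vertically (words : List String) (out : String) : Prop := out = read_vertically_alt words
instance (words : List String) (out : String) : Decidable (Spec_read_vertically words out) := by unfold Spec_read_vertically; infer_instance

-- ===== CLAIM (what is proved, stated in full; the proofs are below) =====
def Claim_equal_read_vertically : Prop := ∀ (words : List String), Dom_read_vertically words → Pre_read_vertically words → Spec_read_vertically words (read_vertically words)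

-- ===== LEMMAS AND PROOFS =====

-- column i of the grid, in word order
def pvCol (words : List String) (i : Nat) : List Char :=
  words.filterMap (fun w => w.toList[i]?)

-- the value of Source B's inner loop over one word, as a structural merge
def pvMerge : List (List Char) → List Char → List (List Char)
  | bs, [] => bs
  | [], c :: cs => [c] :: pvMerge [] cs
  | b :: bs, c :: cs => (b ++ [c]) :: pvMerge bs cs

def pvOptL (o : Option Char) : List Char := o.elim [] (fun c => [c])

def pvMergeF (bs : List (List Char)) (w : String) : List (List Char) :=
  pvMerge bs w.toList

def pvMaxLen : List String → Nat
  | [] => 0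
  | w :: ws => max w.toList.length (pvMaxLen ws)

theorem pvBStep_fold (cs : List Char) : ∀ (bs : List (List Char)) (k : Nat), k ≤ bs.length →
    (PySem.List.enumerate cs (k : Int)).foldl pvBStep bs = bs.take k ++ pvMerge (bs.drop k) cs := by
  induction cs with
  | nil => intro bs k hk; simp [PySem.List.enumerate, pvMerge]
  | cons c cs ih =>
    intro bs k hk
    rw [PySem.List.enumerate_cons]
    simp only [List.foldl_cons]
    rcases Nat.lt_or_eq_of_le hk with hlt | heq
    · have hne : ((k : Int) == (bs.length : Int)) = false := by simp; omega
      have hstep : pvBStep bs ((k : Int), c) = bs.modify k (fun b => b ++ [c]) := by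
        simp [pvBStep, hne]
      rw [hstep]
      have hk' : k + 1 ≤ (bs.modify k (fun b => b ++ [c])).length := by
        simp [List.length_modify]; omega
      have hc : ((k : Int) + 1) = ((k + 1 : Nat) : Int) := by push_cast; ring
      rw [hc, ih _ _ hk']
      have hmod : bs.modify k (fun b => b ++ [c])
          = bs.take k ++ (bs[k] ++ [c]) :: bs.drop (k + 1) := by
        conv_lhs => rw [List.modify_eq_take_cons_drop hlt]
      have hdropk : bs.drop k = bs[k] :: bs.drop (k + 1) := (List.getElem_cons_drop hlt).symm
      have hlen : (bs.take k).length = k := List.length_take_of_le (Nat.le_of_lt hlt)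
      rw [hmod, List.take_append, List.drop_append, hlen, show k + 1 - k = 1 by omega]
      rw [List.take_take, show min (k + 1) k = k by omega]
      have hdz : (bs.take k).drop (k + 1) = [] := List.drop_of_length_le (by simp)
      rw [hdz, hdropk]
      simp [pvMerge]
    · have hbe : ((k : Int) == (bs.length : Int)) = true := by simp; omega
      have hstep : pvBStep bs ((k : Int), c) = bs ++ [[c]] := by
        simp only [pvBStep, hbe, if_pos]
        have h1 : (k : Int).toNat = bs.length := by omega
        rw [h1, List.modify_eq_take_cons_drop (by simp)]
        simp
      rw [hstep]
      have hk' : k + 1 ≤ (bs ++ [[c]]).length := by simp; omega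
      have hc : ((k : Int) + 1) = ((k + 1 : Nat) : Int) := by push_cast; ring
      rw [hc, ih _ _ hk']
      have htake : (bs ++ [[c]]).take (k + 1) = bs ++ [[c]] := by
        apply List.take_of_length_le; simp; omega
      have hdrop : (bs ++ [[c]]).drop (k + 1) = [] := by
        apply List.drop_of_length_le; simp; omega
      have htk : bs.take k = bs := List.take_of_length_le (by omega)
      have hdk : bs.drop k = [] := List.drop_of_length_le (by omega)
      rw [htake, hdrop, htk, hdk]
      simp [pvMerge]

theorem pvMerge_length (cs : List Char) : ∀ bs, (pvMerge bs cs).length = max bs.length cs.length := by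
  induction cs with
  | nil => intro bs; simp [pvMerge]
  | cons c cs ih =>
    intro bs
    cases bs with
    | nil => simp [pvMerge, ih]
    | cons b bs => simp only [pvMerge, List.length_cons, ih]; omega

theorem pvMerge_get (cs : List Char) : ∀ (bs : List (List Char)) (i : Nat),
    ((pvMerge bs cs)[i]?.getD []) = (bs[i]?.getD []) ++ pvOptL cs[i]? := by
  induction cs with
  | nil => intro bs i; simp [pvMerge, pvOptL]
  | cons c cs ih =>
    intro bs i
    cases bs with
    | nil =>
      cases i with
      | zero => simp [pvMerge, pvOptL]
      | succ j =>
        have := ih [] j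
        simp only [List.getElem?_nil, Option.getD_none, List.nil_append] at this ⊢
        rw [show pvMerge [] (c :: cs) = [c] :: pvMerge [] cs from rfl,
          List.getElem?_cons_succ, List.getElem?_cons_succ, this]
    | cons b bs =>
      cases i with
      | zero => simp [pvMerge, pvOptL]
      | succ j =>
        rw [show pvMerge (b :: bs) (c :: cs) = (b ++ [c]) :: pvMerge bs cs from rfl,
          List.getElem?_cons_succ, List.getElem?_cons_succ, List.getElem?_cons_succ]
        exact ih bs j

theorem pvFold_merge_length (ws : List String) : ∀ bs,
    (ws.foldl pvMergeF bs).length = max bs.length (pvMaxLen ws) := by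
  induction ws with
  | nil => intro bs; simp [pvMaxLen]
  | cons w ws ih =>
    intro bs
    simp only [List.foldl_cons, ih, pvMergeF, pvMerge_length, pvMaxLen]
    omega

theorem pvFold_merge_get (ws : List String) : ∀ (bs : List (List Char)) (i : Nat),
    ((ws.foldl pvMergeF bs)[i]?.getD []) = (bs[i]?.getD []) ++ pvCol ws i := by
  induction ws with
  | nil => intro bs i; simp [pvCol]
  | cons w ws ih =>
    intro bs i
    simp only [List.foldl_cons, ih, pvMergeF, pvMerge_get]
    simp [pvCol, List.filterMap_cons]
    cases h : w.toList[i]? <;> simp [pvOptL]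

-- Source B's whole bucket phase is the left fold of pvMerge
theorem pvBuckets_eq (ws : List String) : ∀ bs,
    ws.foldl (fun bs w => (PySem.List.enumerate w.toList).foldl pvBStep bs) bs
      = ws.foldl pvMergeF bs := by
  induction ws with
  | nil => intro bs; rfl
  | cons w ws ih =>
    intro bs
    simp only [List.foldl_cons]
    have h := pvBStep_fold w.toList bs 0 (Nat.zero_le _)
    rw [show (((0 : Nat)) : Int) = 0 by norm_num] at h
    rw [h]
    simp [ih, pvMergeF]

theorem pvBuckets_spec (ws : List String) :
    ws.foldl pvMergeF [] = (List.range (pvMaxLen ws)).map (pvCol ws) := by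
  apply List.ext_getElem
  · simp [pvFold_merge_length]
  · intro i h1 h2
    have hg := pvFold_merge_get ws [] i
    simp only [List.getElem?_nil, Option.getD_none, List.nil_append] at hg
    have hlen : (ws.foldl pvMergeF []).length = pvMaxLen ws := by simp [pvFold_merge_length]
    rw [List.getElem?_eq_getElem h1] at hg
    simp at hg
    simp [hg]

-- the filter/map column A builds equals pvCol
theorem pvColA_eq (ws : List String) (k : Nat) :
    (ws.filter (fun w => decide ((k : Int) < PySem.Str.len w))).map
        (fun w => (PySem.Str.pyGet? w (k : Int)).getD ' ')
      = pvCol ws k := by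
  induction ws with
  | nil => rfl
  | cons w ws ih =>
    by_cases h : (k : Int) < PySem.Str.len w
    · have hk : k < w.toList.length := by rw [PySem.Str.len_eq] at h; exact_mod_cast h
      rw [List.filter_cons_of_pos (by simpa using h), List.map_cons, ih]
      simp [pvCol, List.getElem?_eq_getElem hk]
    · have hnone : w.toList[k]? = none := by
        apply List.getElem?_eq_none
        rw [PySem.Str.len_eq] at h; omega
      rw [List.filter_cons_of_neg (by simpa using h), ih]
      simp [pvCol, hnone]

-- Python's running max over the casted lengths is the cast of pvMaxLen
theorem pvFoldl_max_cast (ls : List String) : ∀ (a : Nat),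
    (ls.map (fun w => PySem.Str.len w)).foldl max (a : Int)
      = ((ls.foldl (fun m w => max m w.toList.length) a : Nat) : Int) := by
  induction ls with
  | nil => intro a; simp
  | cons w ws ih =>
    intro a
    simp only [List.map_cons, List.foldl_cons]
    have : max (a : Int) (PySem.Str.len w) = ((max a w.toList.length : Nat) : Int) := by
      rw [PySem.Str.len_eq]; omega
    rw [this, ih]

theorem pvFoldl_max_eq_pvMaxLen (ws : List String) : ∀ (a : Nat),
    ws.foldl (fun m w => max m w.toList.length) a = max a (pvMaxLen ws) := by
  induction ws with
  | nil => intro a; simp [pvMaxLen]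
  | cons w ws ih => intro a; simp only [List.foldl_cons, ih, pvMaxLen]; omega

-- ===== VERDICT (by name: the statement is the Claim_ definition above) =====
theorem read_vertically_spec : Claim_equal_read_vertically := by
  intro words _ hpre
  unfold Spec_read_vertically read_vertically read_vertically_alt
  cases words with
  | nil => exact absurd rfl hpre
  | cons w ws =>
    rw [pvBuckets_eq, pvBuckets_spec]
    simp only [List.map_cons, PySem.List.max?_id_cons]
    have hmax : (ws.map (fun w => PySem.Str.len w)).foldl max (PySem.Str.len w)
        = ((pvMaxLen (w :: ws) : Nat) : Int) := by
      have h0 : PySem.Str.len w = ((w.toList.length : Nat) : Int) := PySem.Str.len_eq w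
      rw [h0, pvFoldl_max_cast, pvFoldl_max_eq_pvMaxLen]
      simp [pvMaxLen]
    rw [hmax]
    -- reduce A's double fold to a flatMap of columns
    have hinner : ∀ (i : Int) (res : List Char),
        (w :: ws).foldl (fun res w =>
          if i < PySem.Str.len w then res ++ [(PySem.Str.pyGet? w i).getD ' '] else res) res
        = res ++ ((w :: ws).filter (fun w => decide (i < PySem.Str.len w))).map
            (fun w => (PySem.Str.pyGet? w i).getD ' ') := by
      intro i res
      have h := PySem.List.foldl_append_if (fun w => decide (i < PySem.Str.len w))
          (fun w => (PySem.Str.pyGet? w i).getD ' ') (w :: ws) res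
      simpa only [decide_eq_true_eq] using h
    have houter :
        (PySem.List.pyRange 0 ((pvMaxLen (w :: ws) : Nat) : Int) 1).foldl (fun res i =>
          (w :: ws).foldl (fun res w =>
            if i < PySem.Str.len w then res ++ [(PySem.Str.pyGet? w i).getD ' '] else res) res) []
        = (PySem.List.pyRange 0 ((pvMaxLen (w :: ws) : Nat) : Int) 1).flatMap
            (fun i => ((w :: ws).filter (fun w => decide (i < PySem.Str.len w))).map
              (fun w => (PySem.Str.pyGet? w i).getD ' ')) := by
      rw [PySem.List.foldl_congr_mem _ _ _ _ (fun acc i _ => hinner i acc)]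
      exact PySem.List.foldl_append_eq_flatMap _ _ _
    rw [houter]
    rw [PySem.List.pyRange_one]
    have hrange : ((((pvMaxLen (w :: ws) : Nat) : Int) - 0).toNat) = pvMaxLen (w :: ws) := by omega
    rw [hrange]
    rw [List.flatMap_map]
    congr 1
    rw [List.flatten_eq_flatMap]
    rw [List.flatMap_map]
    apply List.flatMap_congr
    intro k _
    have : ((0 : Int) + (k : Nat)) = ((k : Nat) : Int) := by ring
    rw [this, pvColA_eq]
    rfl
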